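-- pv_equiv track=rewrite | github.com/HadyAhmed00/DSP-Operations | main.py | subtract_signals
-- ===== SOURCE A (Python) =====
-- def subtract_signals(signal1, signal2):
--     max_len = max(len(signal1), len(signal2))
--     output_signal = [0] * max_len
--
--     for i in range(max_len):
--         val1 = signal1[i] if i < len(signal1) else 0
--         val2 = signal2[i] if i < len(signal2) else 0
--         output_signal[i] = val1 - val2
--
--     return output_signal
-- ===== SOURCE B (Python) =====
-- def subtract_signals(signal1, signal2):
--     n = min(len(signal1), len(signal2))
--     out = [signal1[i] - signal2[i] for i in range(n)]
--     if len(signal1) > len(signal2):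
--         for x in signal1[n:]:
--             out.append(x - 0)
--     else:
--         for x in signal2[n:]:
--             out.append(0 - x)
--     return out
-- ===== Notes on version B (the rewrite author's own statement) =====
-- stated objective: alternative
-- what changed: Replaces the per-index padding conditional over range(max_len) by two region-specific passes: a zipped common part over range(min) followed by a tail loop over the longer signal's remainder.
import Mathlib
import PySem

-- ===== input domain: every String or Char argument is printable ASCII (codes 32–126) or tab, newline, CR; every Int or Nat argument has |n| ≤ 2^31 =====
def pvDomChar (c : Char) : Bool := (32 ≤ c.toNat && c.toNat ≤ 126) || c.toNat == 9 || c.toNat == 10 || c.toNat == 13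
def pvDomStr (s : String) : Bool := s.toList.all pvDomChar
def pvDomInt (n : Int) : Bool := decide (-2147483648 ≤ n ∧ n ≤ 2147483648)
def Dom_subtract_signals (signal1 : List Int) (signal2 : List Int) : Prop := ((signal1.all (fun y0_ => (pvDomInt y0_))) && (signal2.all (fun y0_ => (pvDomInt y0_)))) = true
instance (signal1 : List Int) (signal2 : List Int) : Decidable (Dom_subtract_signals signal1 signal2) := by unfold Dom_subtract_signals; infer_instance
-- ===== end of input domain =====

-- B replaces A's per-index padding conditional with a zipped common part plus one tail pass over the longer signal (alternative decomposition, same cost).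

-- ===== PORT A =====
def subtract_signals (signal1 : List Int) (signal2 : List Int) : List Int :=
  let maxLen := max signal1.length signal2.length
  (List.range maxLen).map (fun i =>
    (if i < signal1.length then signal1.getD i 0 else 0)
      - (if i < signal2.length then signal2.getD i 0 else 0))

-- ===== PORT B =====
def subtract_signals_alt (signal1 : List Int) (signal2 : List Int) : List Int :=
  let n := min signal1.length signal2.length
  let common := (List.range n).map (fun i => signal1.getD i 0 - signal2.getD i 0)
  if signal2.length < signal1.length then
    common ++ (signal1.drop n).map (fun x => x - 0)
  else
    common ++ (signal2.drop n).map (fun x => 0 - x)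

-- ===== PRECONDITION & SPEC =====
def Spec_subtract_signals (signal1 : List Int) (signal2 : List Int) (out : List Int) : Prop := out = subtract_signals_alt signal1 signal2
instance (signal1 : List Int) (signal2 : List Int) (out : List Int) : Decidable (Spec_subtract_signals signal1 signal2 out) := by unfold Spec_subtract_signals; infer_instance

-- ===== CLAIM (what is proved, stated in full; the proofs are below) =====
def Claim_equal_subtract_signals : Prop := ∀ (signal1 : List Int) (signal2 : List Int), Dom_subtract_signals signal1 signal2 → Spec_subtract_signals signal1 signal2 (subtract_signals signal1 signal2)

-- ===== LEMMAS AND PROOFS =====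

-- ===== VERDICT (by name: the statement is the Claim_ definition above) =====
theorem subtract_signals_spec : Claim_equal_subtract_signals := by
  intro s1 s2 _
  unfold Spec_subtract_signals subtract_signals subtract_signals_alt
  by_cases hgt : s2.length < s1.length
  · rw [if_pos hgt]
    apply List.ext_getElem
    · simp; omega
    · intro i hi hi'
      have hmax : i < max s1.length s2.length := by simpa using hi
      simp only [List.getElem_map, List.getElem_range]
      by_cases h : i < min s1.length s2.length
      · rw [List.getElem_append_left (by simpa using h)]
        simp only [List.getElem_map, List.getElem_range]
        have h1 : i < s1.length := by omega
        have h2 : i < s2.length := by omega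
        simp [h1, h2]
      · have h1 : i < s1.length := by omega
        have h2 : ¬ i < s2.length := by omega
        rw [List.getElem_append_right (by simp; omega)]
        simp only [List.getElem_map, List.getElem_drop, List.length_map, List.length_range]
        have heq : min s1.length s2.length + (i - min s1.length s2.length) = i := by omega
        simp [h1, h2, heq, List.getD_eq_getElem?_getD, List.getElem?_eq_getElem h1]
  · rw [if_neg hgt]
    apply List.ext_getElem
    · simp; omega
    · intro i hi hi'
      have hmax : i < max s1.length s2.length := by simpa using hi
      simp only [List.getElem_map, List.getElem_range]
      by_cases h : i < min s1.length s2.length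
      · rw [List.getElem_append_left (by simpa using h)]
        simp only [List.getElem_map, List.getElem_range]
        have h1 : i < s1.length := by omega
        have h2 : i < s2.length := by omega
        simp [h1, h2]
      · have h2 : i < s2.length := by omega
        have h1 : ¬ i < s1.length := by omega
        rw [List.getElem_append_right (by simp; omega)]
        simp only [List.getElem_map, List.getElem_drop, List.length_map, List.length_range]
        have heq : min s1.length s2.length + (i - min s1.length s2.length) = i := by omega
        simp [h1, h2, heq, List.getD_eq_getElem?_getD, List.getElem?_eq_getElem h2]
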